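-- pv_equiv track=rewrite | github.com/pombreda/pyfpm | src/Functions/utils.py | splitVersionName
-- ===== SOURCE A (Python) =====
-- def splitVersionName (paquet):
--     """
--     Permet de récupérer la version et le nom du paquet quand la chaîne est du format "kernel>=3.7"
--     """
--
--     # TODO
--     # Utiliser les Regex
--
--     liste = paquet.split('>')
--
--     liste2 = []
--     for element in liste:
--         tmp =  element.split('=')
--         liste2.extend(tmp)
--     liste = liste2
--
--     liste2 = []
--     for element in liste:
--         tmp =  element.split('<')
--         liste2.extend(tmp)
--     liste = liste2
--
--     liste2 = []
--     for element in liste: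
--         if element != "":
--             liste2.append(element)
--
--     if len(liste2) > 1:
--         separateur = paquet[len(liste2[0]):len(paquet) - len(liste2[1])]
--         liste2.append(separateur)
--
--     return liste2
-- ===== SOURCE B (Python) =====
-- def splitVersionName(paquet):
--     """
--     Permet de récupérer la version et le nom du paquet quand la chaîne est du format "kernel>=3.7"
--     """
--     result = []
--     buf = ""
--     for ch in paquet:
--         if ch in "<>=":
--             if buf:
--                 result.append(buf)
--                 buf = ""
--         else:
--             buf += ch
--     if buf:
--         result.append(buf)
--     if len(result) > 1:
--         result.append(paquet[len(result[0]):len(paquet) - len(result[1])])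
--     return result
-- ===== Notes on version B (the rewrite author's own statement) =====
-- stated objective: simpler
-- what changed: Replaces A's three sequential split-and-extend passes plus a separate empty-filter pass with one left-to-right scan that buffers a token and flushes it at each '<', '>' or '=' character; the separator slice step is kept identical.
import Mathlib
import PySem

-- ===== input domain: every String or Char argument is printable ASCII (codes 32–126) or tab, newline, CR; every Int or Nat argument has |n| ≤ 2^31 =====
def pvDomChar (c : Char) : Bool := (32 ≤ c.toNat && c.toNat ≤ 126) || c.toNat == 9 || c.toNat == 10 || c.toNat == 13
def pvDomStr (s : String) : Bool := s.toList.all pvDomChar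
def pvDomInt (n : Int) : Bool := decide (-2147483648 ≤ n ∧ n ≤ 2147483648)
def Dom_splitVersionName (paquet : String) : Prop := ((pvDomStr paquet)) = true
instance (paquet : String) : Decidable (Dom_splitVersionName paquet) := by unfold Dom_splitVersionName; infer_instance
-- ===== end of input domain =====

-- B replaces A's three split-and-extend passes plus an empty-filter pass with one
-- buffered left-to-right scan (objective: simpler, same asymptotic cost).

-- ===== PORT A =====
def splitVersionName (paquet : String) : List String :=
  let liste := (PySem.Chars.splitOn paquet.toList ['>']).map String.ofList
  let liste2 := liste.foldl (fun acc element => acc ++ (PySem.Chars.splitOn element.toList ['=']).map String.ofList) []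
  let liste3 := liste2.foldl (fun acc element => acc ++ (PySem.Chars.splitOn element.toList ['<']).map String.ofList) []
  let liste4 := liste3.foldl (fun acc element => if element != "" then acc ++ [element] else acc) []
  if liste4.length > 1 then
    liste4 ++ [PySem.Str.slice paquet (some (PySem.Str.len (PySem.List.pyGetD liste4 0 ""))) (some (PySem.Str.len paquet - PySem.Str.len (PySem.List.pyGetD liste4 1 "")))]
  else liste4

-- ===== PORT B =====
-- 'if buf: result.append(buf); buf = ""' / final flush
def altFlush (acc : List String) (buf : String) : List String :=
  if buf != "" then acc ++ [buf] else acc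

-- the single scan of Source B: 'for ch in paquet: …'
def altLoop : List Char → List String → String → List String
  | [], acc, buf => altFlush acc buf
  | c :: rest, acc, buf =>
    if c = '<' ∨ c = '>' ∨ c = '=' then altLoop rest (altFlush acc buf) ""
    else altLoop rest acc (buf.push c)

def splitVersionName_alt (paquet : String) : List String :=
  let result := altLoop paquet.toList [] ""
  if result.length > 1 then
    result ++ [PySem.Str.slice paquet (some (PySem.Str.len (PySem.List.pyGetD result 0 ""))) (some (PySem.Str.len paquet - PySem.Str.len (PySem.List.pyGetD result 1 "")))]
  else result

-- ===== PRECONDITION & SPEC =====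
def Spec_splitVersionName (paquet : String) (out : List String) : Prop := out = splitVersionName_alt paquet
instance (paquet : String) (out : List String) : Decidable (Spec_splitVersionName paquet out) := by unfold Spec_splitVersionName; infer_instance

-- ===== CLAIM (what is proved, stated in full; the proofs are below) =====
def Claim_equal_splitVersionName : Prop := ∀ (paquet : String), Dom_splitVersionName paquet → Spec_splitVersionName paquet (splitVersionName paquet)

-- ===== LEMMAS AND PROOFS =====

-- prepend a chunk onto the head piece (the head piece is still "open" on the left)
def consHd (b : List Char) : List (List Char) → List (List Char)
  | [] => [b]
  | h :: ts => (b ++ h) :: ts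

-- Python-split of a char list on the delimiter predicate p, keeping empty pieces
def rawSplit (p : Char → Bool) : List Char → List (List Char)
  | [] => [[]]
  | c :: t => if p c then [] :: rawSplit p t else consHd [c] (rawSplit p t)

-- the combined delimiter predicate of A's three passes, in pass order
def delta (c : Char) : Bool := (('>' == c) || ('=' == c)) || ('<' == c)

lemma rawSplit_ne_nil (p : Char → Bool) (l : List Char) : rawSplit p l ≠ [] := by
  cases l with
  | nil => simp [rawSplit]
  | cons c t =>
    simp only [rawSplit]
    split
    · simp
    · cases h : rawSplit p t <;> simp [consHd]

lemma consHd_nil (r : List (List Char)) (h : r ≠ []) : consHd [] r = r := by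
  cases r with
  | nil => exact absurd rfl h
  | cons a t => simp [consHd]

lemma consHd_consHd (a b : List Char) (r : List (List Char)) :
    consHd a (consHd b r) = consHd (a ++ b) r := by
  cases r <;> simp [consHd]

lemma go_eq (d : Char) : ∀ (fuel : Nat) (l cur : List Char) (acc : List (List Char)),
    l.length ≤ fuel →
    PySem.Chars.splitOn.go [d] fuel l cur acc
      = acc.reverse ++ consHd cur.reverse (rawSplit (fun c => d == c) l) := by
  intro fuel
  induction fuel with
  | zero =>
    intro l cur acc h
    have hl : l = [] := by cases l <;> simp_all
    subst hl
    rw [PySem.Chars.splitOn.go.eq_def]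
    simp [rawSplit, consHd]
  | succ n ih =>
    intro l cur acc h
    cases l with
    | nil =>
      rw [PySem.Chars.splitOn.go.eq_def]
      simp [rawSplit, consHd]
    | cons c rest =>
      rw [PySem.Chars.splitOn.go.eq_def]
      simp only [List.length_cons] at h
      by_cases hd : (d == c) = true
      · have hp : List.isPrefixOf [d] (c :: rest) = true := by simp [List.isPrefixOf, hd]
        simp only [hp, if_pos, List.length_cons, List.drop_succ_cons, List.length_nil, List.drop_zero]
        rw [ih rest [] (cur.reverse :: acc) (by omega)]
        simp only [List.reverse_nil]
        rw [consHd_nil _ (rawSplit_ne_nil _ _)]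
        simp only [rawSplit, hd, if_pos]
        simp [consHd]
      · have hp : List.isPrefixOf [d] (c :: rest) = false := by simp [List.isPrefixOf]; simpa using hd
        simp only [hp, Bool.false_eq_true, if_neg, not_false_iff]
        rw [ih rest (c :: cur) acc (by omega)]
        simp only [rawSplit, hd, Bool.false_eq_true, if_neg, not_false_iff]
        rw [consHd_consHd]
        simp

lemma splitOn_eq (d : Char) (cs : List Char) :
    PySem.Chars.splitOn cs [d] = rawSplit (fun c => d == c) cs := by
  unfold PySem.Chars.splitOn
  rw [go_eq d (cs.length + 1) cs [] [] (by omega)]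
  simp [consHd_nil _ (rawSplit_ne_nil _ _)]

lemma rawSplit_cons_exists (p : Char → Bool) (l : List Char) :
    ∃ h ts, rawSplit p l = h :: ts := by
  cases h : rawSplit p l with
  | nil => exact absurd h (rawSplit_ne_nil p l)
  | cons a b => exact ⟨a, b, rfl⟩

lemma flatMap_rawSplit (p q : Char → Bool) : ∀ cs : List Char,
    (rawSplit p cs).flatMap (rawSplit q) = rawSplit (fun c => p c || q c) cs := by
  intro cs
  induction cs with
  | nil => simp [rawSplit]
  | cons c t ih =>
    simp only [rawSplit]
    by_cases hp : p c = true
    · simp only [hp, Bool.true_or, if_pos, List.flatMap_cons, rawSplit]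
      rw [ih]; rfl
    · simp only [hp, Bool.false_eq_true, if_neg, not_false_iff, Bool.false_or]
      obtain ⟨h1, ts, ht⟩ := rawSplit_cons_exists p t
      rw [ht]
      have iht : rawSplit q h1 ++ ts.flatMap (rawSplit q) = rawSplit (fun c => p c || q c) t := by
        rw [← ih, ht]; simp [List.flatMap_cons]
      simp only [consHd, List.singleton_append, List.flatMap_cons]
      by_cases hq : q c = true
      · simp only [rawSplit, hq, if_pos]
        rw [← iht]; simp
      · simp only [rawSplit, hq, Bool.false_eq_true, if_neg, not_false_iff]
        rw [← iht]
        obtain ⟨h2, ts2, ht2⟩ := rawSplit_cons_exists q h1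
        rw [ht2]
        simp [consHd]

lemma ofList_bne_empty (l : List Char) : (String.ofList l != "") = (l != []) := by
  rcases l with _ | ⟨c, t⟩
  · rfl
  · have h : String.ofList (c :: t) ≠ "" := by
      intro h; have := String.toList_inj.mpr h; simp at this
    show _ = true
    simp [bne_iff_ne, h]

lemma str_bne_empty (s : String) : (s != "") = (s.toList != []) := by
  conv_lhs => rw [← String.ofList_toList (s := s)]
  exact ofList_bne_empty s.toList

lemma delta_true {c : Char} (h : c = '<' ∨ c = '>' ∨ c = '=') : delta c = true := by
  rcases h with rfl | rfl | rfl <;> rfl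

lemma delta_false {c : Char} (h : ¬(c = '<' ∨ c = '>' ∨ c = '=')) : delta c = false := by
  push Not at h
  obtain ⟨h1, h2, h3⟩ := h
  simp [delta, beq_eq_false_iff_ne, Ne.symm h1, Ne.symm h2, Ne.symm h3]

lemma tokens_a (cs : List Char) :
    ((((PySem.Chars.splitOn cs ['>']).map String.ofList).foldl
        (fun acc element => acc ++ (PySem.Chars.splitOn element.toList ['=']).map String.ofList) []).foldl
        (fun acc element => acc ++ (PySem.Chars.splitOn element.toList ['<']).map String.ofList) []).foldl
        (fun acc element => if element != "" then acc ++ [element] else acc) []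
      = ((rawSplit delta cs).filter (· != [])).map String.ofList := by
  have hfi : ∀ (l acc : List String),
      List.foldl (fun acc x => if (x != "") = true then acc ++ [x] else acc) acc l
        = acc ++ List.filter (· != "") l := by
    intro l acc
    simpa using PySem.List.foldl_append_if (· != "") id l acc
  rw [PySem.List.foldl_append_eq_flatMap, PySem.List.foldl_append_eq_flatMap, hfi]
  simp only [List.nil_append, List.flatMap_map, String.toList_ofList]
  have h2 : (rawSplit (fun c => '>' == c) cs).flatMap
      (fun a => (PySem.Chars.splitOn a ['=']).map String.ofList)
      = ((rawSplit (fun c => ('>' == c) || ('=' == c)) cs).map String.ofList) := by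
    simp only [splitOn_eq, ← flatMap_rawSplit (fun c => '>' == c) (fun c => '=' == c) cs]
    rw [List.map_flatMap]
  rw [splitOn_eq, h2, List.flatMap_map]
  simp only [String.toList_ofList]
  have h3 : (rawSplit (fun c => ('>' == c) || ('=' == c)) cs).flatMap
      (fun a => (PySem.Chars.splitOn a ['<']).map String.ofList)
      = (rawSplit delta cs).map String.ofList := by
    have : delta = fun c => (('>' == c) || ('=' == c)) || ('<' == c) := by
      funext c; rfl
    rw [this]
    simp only [splitOn_eq,
      ← flatMap_rawSplit (fun c => ('>' == c) || ('=' == c)) (fun c => '<' == c) cs]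
    rw [List.map_flatMap]
  rw [h3, List.filter_map]
  congr 1
  apply List.filter_congr
  intro l _
  exact ofList_bne_empty l

lemma tokens_b (cs : List Char) : ∀ (acc : List String) (buf : String),
    altLoop cs acc buf
      = acc ++ ((consHd buf.toList (rawSplit delta cs)).filter (· != [])).map String.ofList := by
  induction cs with
  | nil =>
    intro acc buf
    simp only [altLoop, altFlush, rawSplit, consHd, List.append_nil]
    rw [str_bne_empty]
    by_cases hb : buf.toList = []
    · simp [hb]
    · have : (buf.toList != []) = true := by simpa [bne_iff_ne] using hb
      simp [this, String.ofList_toList]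
  | cons c rest ih =>
    intro acc buf
    simp only [altLoop]
    by_cases hc : c = '<' ∨ c = '>' ∨ c = '='
    · rw [if_pos hc, ih]
      simp only [rawSplit, delta_true hc, if_pos]
      have hs : ("" : String).toList = [] := rfl
      rw [hs, consHd_nil _ (rawSplit_ne_nil _ _)]
      obtain ⟨h1, ts, ht⟩ := rawSplit_cons_exists delta rest
      rw [ht]
      simp only [consHd, List.append_nil, List.filter_cons]
      by_cases hb : buf.toList = []
      · have hb0 : buf = "" := String.toList_inj.mp (by simp [hb])
        subst hb0
        simp [altFlush]
      · have hb' : (buf.toList != []) = true := by simpa [bne_iff_ne] using hb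
        simp [altFlush, str_bne_empty, hb', String.ofList_toList]
    · rw [if_neg hc, ih]
      simp only [rawSplit, delta_false hc, Bool.false_eq_true, if_neg, not_false_iff]
      rw [consHd_consHd, String.toList_push]

-- ===== VERDICT (by name: the statement is the Claim_ definition above) =====
theorem splitVersionName_spec : Claim_equal_splitVersionName := by
  intro paquet _
  show splitVersionName paquet = splitVersionName_alt paquet
  simp only [splitVersionName, splitVersionName_alt]
  rw [tokens_a, tokens_b]
  simp [consHd_nil _ (rawSplit_ne_nil _ _)]
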